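-- pv_equiv track=rewrite | github.com/ridassaf/islands | repeatFeatures.py | numPalindromes
-- ===== SOURCE A (Python) =====
-- def getComplement(seq):
-- 	return seq[::-1]
--
-- def numPalindromes(seq, j):
-- 	num_palindromes = 0
-- 	current_seq = ''
-- 	for i in range(len(seq)):
-- 		if i < j:
-- 			current_seq += seq[i]
-- 		else:
-- 			comp_seq = getComplement(current_seq)
-- 			if comp_seq == seq[i:i+j] or comp_seq == seq[i+1:i+j+1]:
-- 				num_palindromes += 1
-- 			current_seq = current_seq[1:] + seq[i]
-- 	return num_palindromes
-- ===== SOURCE B (Python) =====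
-- def _rc_match(seq, j, n, i, off):
--     return i + j + off <= n and all(seq[i - 1 - t] == seq[i + off + t] for t in range(j))
--
-- def numPalindromes(seq, j):
--     n = len(seq)
--     count = 0
--     for i in range(max(j, 0), n):
--         if _rc_match(seq, j, n, i, 0) or _rc_match(seq, j, n, i, 1):
--             count += 1
--     return count
-- ===== Notes on version B (the rewrite author's own statement) =====
-- stated objective: alternative
-- what changed: A maintains a sliding buffer string, reverses it and builds two fresh slice strings to compare at every position; B keeps no state at all and tests each position by direct short-circuiting index comparisons into the original string (plus an O(1) length guard), so no intermediate strings are ever built.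
-- intended difference: For j <= 0 on strings of length >= 2, A returns a leftover-buffer artefact (its stale 1-char buffer is compared against wrapped-around negative slices, giving 0, 1 or 2), while B returns len(seq), counting every position whose vacuous length-j condition holds - the consistent reading of the vacuous check. — e.g. on numPalindromes("ab", 0): A returns 1, B returns 2
import Mathlib
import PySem

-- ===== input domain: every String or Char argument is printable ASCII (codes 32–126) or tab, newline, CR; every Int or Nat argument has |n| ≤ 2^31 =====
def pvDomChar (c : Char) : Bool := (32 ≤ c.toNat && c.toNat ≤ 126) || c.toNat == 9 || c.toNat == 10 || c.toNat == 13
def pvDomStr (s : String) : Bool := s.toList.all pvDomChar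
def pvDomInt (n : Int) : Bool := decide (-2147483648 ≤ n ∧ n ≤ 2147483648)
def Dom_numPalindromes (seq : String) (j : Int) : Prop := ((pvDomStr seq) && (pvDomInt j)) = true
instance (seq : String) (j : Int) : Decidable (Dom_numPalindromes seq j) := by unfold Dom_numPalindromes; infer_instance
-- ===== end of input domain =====

-- B replaces A's sliding reversed-buffer string building with direct index comparisons (short-circuiting); return value only, no mutation.

-- ===== PORT A =====
-- getComplement(seq) = seq[::-1]
def getComplementL (cs : List Char) : List Char :=
  (PySem.List.slice? cs none none (-1)).getD []

-- the body of A's for-loop (state = (num_palindromes, current_seq))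
def aStep (s : List Char) (j : Int) (st : Int × List Char) (i : Int) : Int × List Char :=
  if i < j then
    (st.1, st.2 ++ [PySem.List.pyGetD s i ' '])
  else
    let comp := getComplementL st.2
    let num := if comp = PySem.List.slice s (some i) (some (i + j)) ∨
                  comp = PySem.List.slice s (some (i + 1)) (some (i + j + 1)) then st.1 + 1 else st.1
    (num, PySem.List.slice st.2 (some 1) none ++ [PySem.List.pyGetD s i ' '])

def numPalindromes (seq : String) (j : Int) : Int :=
  let s := seq.toList
  ((PySem.List.pyRange 0 (s.length : Int) 1).foldl (aStep s j) (0, [])).1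

-- ===== PORT B =====
-- _rc_match(seq, j, n, i, off)
def rcMatch (s : List Char) (j n i off : Int) : Bool :=
  decide (i + j + off ≤ n) &&
    (PySem.List.pyRange 0 j 1).all
      (fun t => PySem.List.pyGetD s (i - 1 - t) ' ' == PySem.List.pyGetD s (i + off + t) ' ')

def numPalindromes_alt (seq : String) (j : Int) : Int :=
  let s := seq.toList
  let n : Int := s.length
  (PySem.List.pyRange (max j 0) n 1).foldl
    (fun count i => if rcMatch s j n i 0 || rcMatch s j n i 1 then count + 1 else count) 0

-- ===== PRECONDITION & SPEC =====
-- For j ≤ 0 on a string of length ≥ 2, A's answer is an artefact of its leftover loop buffer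
-- (the stale buffer ends up compared against wrapped-around negative slices), while B counts
-- every position whose vacuous length-j check holds and returns len(seq) — the consistent
-- reading of the vacuous condition.
def D_numPalindromes (seq : String) (j : Int) : Prop := j ≤ 0 ∧ 2 ≤ seq.toList.length
instance (seq : String) (j : Int) : Decidable (D_numPalindromes seq j) := by
  unfold D_numPalindromes; infer_instance

def Spec_numPalindromes (seq : String) (j : Int) (out : Int) : Prop :=
  ¬ D_numPalindromes seq j → out = numPalindromes_alt seq j
instance (seq : String) (j : Int) (out : Int) : Decidable (Spec_numPalindromes seq j out) := by
  unfold Spec_numPalindromes; infer_instance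

def pvDiffWitness_numPalindromes : String × Int := ("ab", 0)
def pvDiffWitnessOut_numPalindromes : Int × Int := (1, 2)

-- ===== CLAIM (what is proved, stated in full; the proofs are below) =====
def Claim_unchanged_numPalindromes : Prop := ∀ (seq : String) (j : Int), Dom_numPalindromes seq j → Spec_numPalindromes seq j (numPalindromes seq j)
def Claim_changed_numPalindromes : Prop := Dom_numPalindromes (pvDiffWitness_numPalindromes.1) (pvDiffWitness_numPalindromes.2) ∧ D_numPalindromes (pvDiffWitness_numPalindromes.1) (pvDiffWitness_numPalindromes.2) ∧ numPalindromes (pvDiffWitness_numPalindromes.1) (pvDiffWitness_numPalindromes.2) = pvDiffWitnessOut_numPalindromes.1 ∧ numPalindromes_alt (pvDiffWitness_numPalindromes.1) (pvDiffWitness_numPalindromes.2) = pvDiffWitnessOut_numPalindromes.2 ∧ pvDiffWitnessOut_numPalindromes.1 ≠ pvDiffWitnessOut_numPalindromes.2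
def Claim_exact_numPalindromes : Prop := ∀ (seq : String) (j : Int), Dom_numPalindromes seq j → D_numPalindromes seq j → numPalindromes seq j ≠ numPalindromes_alt seq j

-- ===== LEMMAS AND PROOFS =====

lemma getComplementL_eq_reverse (cs : List Char) : getComplementL cs = cs.reverse := by
  simp [getComplementL, PySem.List.slice?_none_none_neg_one]

lemma clampIdx_spec (n : Nat) (i : Int) :
    (PySem.List.clampIdx n i : Int) = if i < 0 then max 0 (n + i) else min i n := by
  simp only [PySem.List.clampIdx]
  split_ifs <;> push_cast <;> omega

lemma slice_eq_nil (xs : List Char) (a b : Int)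
    (h : PySem.List.clampIdx xs.length b ≤ PySem.List.clampIdx xs.length a) :
    PySem.List.slice xs (some a) (some b) = [] := by
  apply List.eq_nil_of_length_eq_zero
  rw [PySem.List.length_slice]
  omega

-- pointwise characterisation of "reversed window = forward slice"
lemma rev_window_eq_iff (s : List Char) (jn m q : Nat) (hj : 1 ≤ jn) (hjm : jn ≤ m)
    (hmq : m ≤ q) (hq : q ≤ s.length) :
    (((s.take m).drop (m - jn)).reverse = (s.drop q).take jn) ↔
      (q + jn ≤ s.length ∧ ∀ t, t < jn → s.getD (m - 1 - t) ' ' = s.getD (q + t) ' ') := by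
  have hm : m ≤ s.length := le_trans hmq hq
  have hlenw : ((s.take m).drop (m - jn)).length = jn := by
    simp [List.length_drop, List.length_take]; omega
  constructor
  · intro h
    have hlen : jn = ((s.drop q).take jn).length := by
      rw [← h]; simp [hlenw]
    have hql : q + jn ≤ s.length := by
      simp [List.length_take, List.length_drop] at hlen; omega
    refine ⟨hql, fun t ht => ?_⟩
    have h1 : (((s.take m).drop (m - jn)).reverse)[t]'(by simp [hlenw]; omega) =
        ((s.drop q).take jn)[t]'(by simp [List.length_take, List.length_drop]; omega) := by
      simp [h]
    rw [List.getElem_reverse] at h1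
    simp only [List.getElem_drop, List.getElem_take, hlenw] at h1
    rw [List.getD_eq_getElem _ _ (by omega), List.getD_eq_getElem _ _ (by omega)]
    rw [← h1]
    exact getElem_congr rfl (by omega) (by omega)
  · intro ⟨hql, hpt⟩
    apply List.ext_getElem
    · simp [hlenw, List.length_take, List.length_drop]; omega
    · intro t h1 h2
      rw [List.getElem_reverse]
      simp only [List.getElem_drop, List.getElem_take, hlenw]
      have ht : t < jn := by simpa [hlenw] using h1
      have h3 := hpt t ht
      rw [List.getD_eq_getElem _ _ (by omega), List.getD_eq_getElem _ _ (by omega)] at h3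
      rw [← h3]
      exact getElem_congr rfl (by omega) (by omega)

lemma rcMatch_iff (s : List Char) (jn m : Nat) (off : Int) (hoff : 0 ≤ off) (hjm : jn ≤ m) :
    (rcMatch s jn s.length m off = true) ↔
      ((m : Int) + jn + off ≤ s.length ∧
        ∀ t, t < jn → s.getD (m - 1 - t) ' ' = s.getD (m + off.toNat + t) ' ') := by
  simp only [rcMatch, Bool.and_eq_true, decide_eq_true_eq, PySem.List.pyRange_zero_natCast,
    List.all_map, List.all_eq_true, List.mem_range, Function.comp_apply, beq_iff_eq]
  constructor
  · intro ⟨hle, hall⟩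
    refine ⟨hle, fun t ht => ?_⟩
    have h := hall t ht
    rw [show (m : Int) - 1 - t = ((m - 1 - t : Nat) : Int) by omega,
        show (m : Int) + off + t = ((m + off.toNat + t : Nat) : Int) by omega,
        PySem.List.pyGetD_natCast, PySem.List.pyGetD_natCast] at h
    exact h
  · intro ⟨hle, hall⟩
    refine ⟨hle, fun t ht => ?_⟩
    have h := hall t ht
    rw [show (m : Int) - 1 - t = ((m - 1 - t : Nat) : Int) by omega,
        show (m : Int) + off + t = ((m + off.toNat + t : Nat) : Int) by omega,
        PySem.List.pyGetD_natCast, PySem.List.pyGetD_natCast]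
    exact h

-- A's first comparison at i = m is B's rcMatch with off = 0
lemma cond0_iff (s : List Char) (jn m : Nat) (hj : 1 ≤ jn) (hjm : jn ≤ m) (hm : m < s.length) :
    (((s.take m).drop (m - jn)).reverse =
        PySem.List.slice s (some (m : Int)) (some ((m : Int) + (jn : Int)))) ↔
      rcMatch s jn s.length m 0 = true := by
  rw [PySem.List.slice_natCast_add,
      rev_window_eq_iff s jn m m hj hjm le_rfl (le_of_lt hm),
      rcMatch_iff s jn m 0 (by omega) hjm]
  constructor
  · intro ⟨h1, h2⟩; exact ⟨by omega, by simpa using h2⟩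
  · intro ⟨h1, h2⟩; exact ⟨by omega, by simpa using h2⟩

-- A's second comparison at i = m is B's rcMatch with off = 1
lemma cond1_iff (s : List Char) (jn m : Nat) (hj : 1 ≤ jn) (hjm : jn ≤ m) (hm : m < s.length) :
    (((s.take m).drop (m - jn)).reverse =
        PySem.List.slice s (some ((m : Int) + 1)) (some ((m : Int) + (jn : Int) + 1))) ↔
      rcMatch s jn s.length m 1 = true := by
  rw [show (m : Int) + 1 = ((m + 1 : Nat) : Int) by push_cast; omega,
      show (m : Int) + (jn : Int) + 1 = ((m + 1 : Nat) : Int) + (jn : Int) by push_cast; omega,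
      PySem.List.slice_natCast_add,
      rev_window_eq_iff s jn m (m + 1) hj hjm (by omega) (by omega),
      rcMatch_iff s jn m 1 (by omega) hjm]
  constructor
  · intro ⟨h1, h2⟩; exact ⟨by omega, by simpa using h2⟩
  · intro ⟨h1, h2⟩; exact ⟨by omega, by simpa using h2⟩

-- the sliding buffer really is the last-jn-characters window
lemma window_update (s : List Char) (jn m : Nat) (hj : 1 ≤ jn) (hjm : jn ≤ m)
    (hm : m < s.length) :
    ((s.take m).drop (m - jn)).tail ++ [s[m]] = (s.take (m + 1)).drop (m + 1 - jn) := by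
  rw [List.tail_drop]
  have h1 : s.take (m + 1) = s.take m ++ [s[m]] := by
    rw [List.take_add_one]
    simp [List.getElem?_eq_getElem hm]
  rw [show m - jn + 1 = m + 1 - jn by omega, h1,
      List.drop_append_of_le_length (by simp [List.length_take]; omega)]

-- master invariant: A's fold computes B's count plus the sliding window (case 1 ≤ j)
lemma A_loop (s : List Char) (jn : Nat) (hj : 1 ≤ jn) (m : Nat) (hm : m ≤ s.length) :
    (List.range m).foldl (fun st (k : Nat) => aStep s (jn : Int) st (k : Int)) ((0 : Int), ([] : List Char)) =
      ((PySem.List.pyRange (jn : Int) (m : Int) 1).foldl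
          (fun c i => if rcMatch s (jn : Int) (s.length : Int) i 0 ||
                         rcMatch s (jn : Int) (s.length : Int) i 1 then c + 1 else c) 0,
        (s.take m).drop (m - jn)) := by
  induction m with
  | zero =>
    rw [PySem.List.pyRange_one_eq_nil (by exact_mod_cast Nat.zero_le jn)]
    simp
  | succ m ih =>
    have hm' : m ≤ s.length := by omega
    have hmlt : m < s.length := by omega
    rw [List.range_succ, List.foldl_append, ih hm']
    simp only [List.foldl_cons, List.foldl_nil]
    by_cases hcase : m < jn
    · rw [aStep, if_pos (by exact_mod_cast hcase)]
      rw [PySem.List.pyRange_one_eq_nil (by omega),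
          PySem.List.pyRange_one_eq_nil (by omega)]
      simp only [List.foldl_nil]
      refine Prod.ext rfl ?_
      simp only
      rw [PySem.List.pyGetD_natCast, List.getD_eq_getElem _ _ hmlt,
          Nat.sub_eq_zero_of_le (by omega), Nat.sub_eq_zero_of_le (by omega),
          List.drop_zero, List.drop_zero, List.take_add_one]
      simp [List.getElem?_eq_getElem hmlt]
    · have hjm : jn ≤ m := by omega
      rw [aStep, if_neg (by exact_mod_cast hcase)]
      simp only [getComplementL_eq_reverse]
      refine Prod.ext ?_ ?_
      · simp only
        rw [show ((m + 1 : Nat) : Int) = ((m : Nat) : Int) + 1 by omega,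
            PySem.List.pyRange_one_succ_right (by exact_mod_cast hjm), List.foldl_append]
        simp only [List.foldl_cons, List.foldl_nil]
        congr 1
        rw [Bool.or_eq_true]
        exact propext (or_congr (cond0_iff s jn m hj hjm hmlt) (cond1_iff s jn m hj hjm hmlt))
      · simp only
        rw [PySem.List.slice_from_one, PySem.List.pyGetD_natCast, List.getD_eq_getElem _ _ hmlt]
        exact window_update s jn m hj hjm hmlt

-- j ≥ 1 : full agreement
lemma A_eq_B_of_pos (seq : String) (j : Int) (hj : 1 ≤ j) :
    numPalindromes seq j = numPalindromes_alt seq j := by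
  unfold numPalindromes numPalindromes_alt
  simp only [max_eq_left (by omega : (0:Int) ≤ j)]
  set s := seq.toList with hs
  obtain ⟨jn, rfl⟩ : ∃ jn : Nat, (jn : Int) = j := ⟨j.toNat, by omega⟩
  have hj1 : 1 ≤ jn := by exact_mod_cast hj
  rw [PySem.List.pyRange_zero_natCast, List.foldl_map]
  rw [A_loop s jn hj1 s.length le_rfl]

-- j ≤ 0 : B returns len(seq)
lemma B_eq_len (seq : String) (j : Int) (hj : j ≤ 0) :
    numPalindromes_alt seq j = seq.toList.length := by
  unfold numPalindromes_alt
  simp only [max_eq_right hj]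
  set s := seq.toList with hs
  rw [PySem.List.foldl_if_add_one]
  rw [List.countP_eq_length.mpr ?_, PySem.List.length_pyRange_one]
  · omega
  · intro i hi
    rw [PySem.List.mem_pyRange_one] at hi
    have h0 : rcMatch s j s.length i 0 = true := by
      simp only [rcMatch, PySem.List.pyRange_one_eq_nil hj, List.all_nil, Bool.and_true,
        decide_eq_true_eq]
      omega
    simp [h0]

lemma aStep_fst_le (s : List Char) (j : Int) (st : Int × List Char) (i : Int) :
    (aStep s j st i).1 ≤ st.1 + 1 := by
  rw [aStep]
  split_ifs <;> simp
  omega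

lemma aStep_snd_ne_nil (s : List Char) (j : Int) (st : Int × List Char) (i : Int) :
    (aStep s j st i).2 ≠ [] := by
  rw [aStep]
  split_ifs <;> simp

lemma foldl_aStep_fst_le (s : List Char) (j : Int) (l : List Int) (st : Int × List Char) :
    ((l.foldl (aStep s j) st).1) ≤ st.1 + l.length := by
  induction l generalizing st with
  | nil => simp
  | cons i t ih =>
    simp only [List.foldl_cons, List.length_cons]
    calc ((t.foldl (aStep s j) (aStep s j st i)).1) ≤ (aStep s j st i).1 + t.length := ih _
      _ ≤ st.1 + 1 + t.length := by have := aStep_fst_le s j st i; omega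
      _ = st.1 + (t.length + 1) := by omega

lemma foldl_aStep_snd_ne_nil (s : List Char) (j : Int) (l : List Int) (st : Int × List Char)
    (h : st.2 ≠ []) : ((l.foldl (aStep s j) st).2) ≠ [] := by
  induction l generalizing st with
  | nil => simpa
  | cons i t ih =>
    simp only [List.foldl_cons]
    exact ih _ (aStep_snd_ne_nil s j st i)

-- j ≤ 0, len ≥ 2 : A's final iteration cannot count, so A < len = B
lemma A_lt_len (seq : String) (j : Int) (hj : j ≤ 0) (h2 : 2 ≤ seq.toList.length) :
    numPalindromes seq j < seq.toList.length := by
  have hrepr : numPalindromes seq j =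
      ((PySem.List.pyRange 0 ((seq.toList.length : Nat) : Int) 1).foldl
        (aStep seq.toList j) (0, [])).1 := rfl
  rw [hrepr]
  set s := seq.toList with hs
  set n := s.length with hn
  have hsplit : PySem.List.pyRange 0 (n : Int) 1 =
      PySem.List.pyRange 0 ((n - 1 : Nat) : Int) 1 ++ [((n - 1 : Nat) : Int)] := by
    rw [← PySem.List.pyRange_one_succ_right (by exact_mod_cast Nat.zero_le _)]
    congr 1
    omega
  rw [hsplit, List.foldl_append]
  set st := (PySem.List.pyRange 0 ((n - 1 : Nat) : Int) 1).foldl (aStep s j) (0, []) with hst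
  have hfst : st.1 ≤ (n : Int) - 1 := by
    have hcons : PySem.List.pyRange 0 ((n - 1 : Nat) : Int) 1 =
        0 :: PySem.List.pyRange 1 ((n - 1 : Nat) : Int) 1 :=
      PySem.List.pyRange_one_cons (by exact_mod_cast Nat.lt_of_lt_of_le one_pos (by omega))
    rw [hst, hcons, List.foldl_cons]
    have h1 := foldl_aStep_fst_le s j (PySem.List.pyRange 1 ((n - 1 : Nat) : Int) 1)
      (aStep s j (0, []) 0)
    have h2' := aStep_fst_le s j (0, []) 0
    have h3 : (PySem.List.pyRange 1 ((n - 1 : Nat) : Int) 1).length = ((n - 1 : Nat) : Int).toNat - 1 := by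
      rw [PySem.List.length_pyRange_one]
      omega
    rw [h3] at h1
    simp only at h2'
    omega
  have hsnd : st.2 ≠ [] := by
    have hcons : PySem.List.pyRange 0 ((n - 1 : Nat) : Int) 1 =
        0 :: PySem.List.pyRange 1 ((n - 1 : Nat) : Int) 1 :=
      PySem.List.pyRange_one_cons (by exact_mod_cast Nat.lt_of_lt_of_le one_pos (by omega))
    rw [hst, hcons, List.foldl_cons]
    exact foldl_aStep_snd_ne_nil s j _ _ (aStep_snd_ne_nil s j (0, []) 0)
  simp only [List.foldl_cons, List.foldl_nil]
  rw [aStep, if_neg (by omega)]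
  simp only [getComplementL_eq_reverse]
  have hclamp1 := clampIdx_spec n (((n - 1 : Nat) : Int))
  have hclamp2 := clampIdx_spec n (((n - 1 : Nat) : Int) + j)
  have hclamp3 := clampIdx_spec n (((n - 1 : Nat) : Int) + 1)
  have hclamp4 := clampIdx_spec n (((n - 1 : Nat) : Int) + j + 1)
  have hs1 : PySem.List.slice s (some ((n - 1 : Nat) : Int))
      (some (((n - 1 : Nat) : Int) + j)) = [] := by
    apply slice_eq_nil
    rw [← hn]
    omega
  have hs2 : PySem.List.slice s (some (((n - 1 : Nat) : Int) + 1))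
      (some (((n - 1 : Nat) : Int) + j + 1)) = [] := by
    apply slice_eq_nil
    rw [← hn]
    omega
  rw [hs1, hs2, if_neg (by simp [hsnd])]
  omega

-- j ≤ 0, len ≤ 1 : agreement on the tiny cases
lemma A_eq_B_small (seq : String) (j : Int) (hj : j ≤ 0) (h1 : seq.toList.length ≤ 1) :
    numPalindromes seq j = numPalindromes_alt seq j := by
  rw [B_eq_len seq j hj]
  have hrepr : numPalindromes seq j =
      ((PySem.List.pyRange 0 ((seq.toList.length : Nat) : Int) 1).foldl
        (aStep seq.toList j) (0, [])).1 := rfl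
  rw [hrepr]
  set s := seq.toList with hs
  interval_cases h : s.length
  · rw [show ((0 : Nat) : Int) = 0 by rfl, PySem.List.pyRange_one_eq_nil le_rfl]
    simp
  · rw [show ((1 : Nat) : Int) = 0 + 1 by rfl,
        PySem.List.pyRange_one_succ_right le_rfl, PySem.List.pyRange_one_eq_nil le_rfl]
    simp only [List.nil_append, List.foldl_cons, List.foldl_nil]
    rw [aStep, if_neg (by omega)]
    simp only [getComplementL_eq_reverse, List.reverse_nil]
    have hc0 := clampIdx_spec s.length (0 : Int)
    have hcj := clampIdx_spec s.length ((0 : Int) + j)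
    have hs1 : PySem.List.slice s (some (0 : Int)) (some (0 + j)) = [] := by
      apply slice_eq_nil
      omega
    rw [hs1, if_pos (Or.inl rfl)]

-- ===== VERDICT (by name: the statement is the Claim_ definition above) =====
theorem numPalindromes_spec : Claim_unchanged_numPalindromes := by
  intro seq j _ hD
  by_cases hj : 1 ≤ j
  · exact A_eq_B_of_pos seq j hj
  · have hj0 : j ≤ 0 := by omega
    have h1 : seq.toList.length ≤ 1 := by
      by_contra h
      exact hD ⟨hj0, by omega⟩
    exact A_eq_B_small seq j hj0 h1

theorem numPalindromes_changed : Claim_changed_numPalindromes := by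
  unfold Claim_changed_numPalindromes; decide

theorem numPalindromes_tight : Claim_exact_numPalindromes := by
  intro seq j _ hD
  obtain ⟨hj, h2⟩ := hD
  rw [B_eq_len seq j hj]
  have := A_lt_len seq j hj h2
  omega
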